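-- pv_equiv track=rewrite | github.com/dchege711/cos333_tiger_leagues | dev_scripts/dummy_fixtures.py | fixture_generator
-- ===== SOURCE A (Python) =====
-- from math import ceil
--
-- def fixture_generator(users):
--     # we need a more effective of finding all the users in the league.
--     # as of right now we need to iterate through every user and the league_ids they pertain to
--     length = len(users)
--     odd = 0
--
--     if length % 2 is not 0:
--         odd = 1
--
--     half = ceil(length/2)
--
--     tempList1 = [None] * half
--     tempList2 = [None] * half
--
--     for i in range(0, half):
--     	tempList1[i] = users[i]
--
--     j = 0
--     for i in range(length-1, half-1, -1):
--     	tempList2[j] = users[i]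
--     	j += 1
--
--     fixtures_list = []
--     rounds_list = []
--     pairs_list = []
--
--     for j in range(0,length-1):
--         for i in range(0, half):
--             pairs_list = [tempList1[i], tempList2[i]]
--             rounds_list.append(pairs_list)
--             pairs_list = []
--         tempList1.insert(1, tempList2[0])
--         del tempList2[0]
--         tempList2.append(tempList1[half])
--         del tempList1[-1]
--         fixtures_list.append(rounds_list)
--         rounds_list = []
--
--     return fixtures_list
-- ===== SOURCE B (Python) =====
-- def fixture_generator(users):
--     # Closed-form circle method: keep users[0] fixed, index the rotating ring
--     # arithmetically instead of mutating temp lists with insert/del.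
--     length = len(users)
--     half = (length + 1) // 2
--     if length % 2:
--         ring = users[1:half] + [None] + users[half:]
--     else:
--         ring = users[1:]
--     m = len(ring)
--     fixtures = []
--     for j in range(length - 1):
--         top = [users[0]] + [ring[(i - 1 - j) % m] for i in range(1, half)]
--         bottom = [ring[(2 * half - 2 - i - j) % m] for i in range(half)]
--         fixtures.append([[top[i], bottom[i]] for i in range(half)])
--     return fixtures
-- ===== Notes on version B (the rewrite author's own statement) =====
-- stated objective: alternative
-- what changed: Replaces A's per-round mutation of two temp rows via insert(1,.)/del/append with a fixed rotating ring and a closed-form modular index formula that computes each round's rows directly.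
import Mathlib
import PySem

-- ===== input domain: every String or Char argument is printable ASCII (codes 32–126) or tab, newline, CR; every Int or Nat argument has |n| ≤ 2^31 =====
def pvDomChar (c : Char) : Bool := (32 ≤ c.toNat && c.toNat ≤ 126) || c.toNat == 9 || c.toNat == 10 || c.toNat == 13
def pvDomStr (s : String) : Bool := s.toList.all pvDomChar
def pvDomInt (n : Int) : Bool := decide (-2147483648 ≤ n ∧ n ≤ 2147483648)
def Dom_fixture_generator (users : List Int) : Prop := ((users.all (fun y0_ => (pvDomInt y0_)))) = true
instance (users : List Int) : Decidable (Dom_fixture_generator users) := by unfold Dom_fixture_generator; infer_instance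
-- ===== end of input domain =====

-- B replaces A's mutate-with-insert/del round rotation by direct modular indexing
-- into a fixed ring (objective: alternative decomposition, same output).
-- Both ports model Python's None bye marker by Option Int internally; an emitted
-- None has no Int image, so the ports are exact on even-length inputs — exactly Pre_.

-- ===== PORT A =====
-- shared with port B: unwrap an element read that Python guarantees succeeds
-- (outer getD: index in range; inner getD: the slot holds an int, not None —
-- both always hold on even-length inputs inside the loop)
def pvVal (o : Option (Option Int)) : Int := (o.getD none).getD 0

-- the inner 'for i in range(half)' loop building one round's pair list
def pvRound (half : Nat) (t1 t2 : List (Option Int)) : List (List Int) :=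
  (List.range half).map (fun (i : Nat) =>
    [pvVal (PySem.List.pyGet? t1 (i : Int)), pvVal (PySem.List.pyGet? t2 (i : Int))])

-- one iteration of A's outer loop (tempList1.insert(1,·); del tempList2[0];
-- tempList2.append(tempList1[half]); del tempList1[-1])
def pvStep (half : Nat)
    (s : List (Option Int) × List (Option Int) × List (List (List Int))) :
    List (Option Int) × List (Option Int) × List (List (List Int)) :=
  let t1 := s.1
  let t2 := s.2.1
  let acc := s.2.2
  let rounds := pvRound half t1 t2
  let t1a := PySem.List.insert t1 1 ((PySem.List.pyGet? t2 0).getD none)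
  let t2a := t2.drop 1
  let t2b := t2a ++ [(PySem.List.pyGet? t1a (half : Int)).getD none]
  let t1b := t1a.dropLast
  (t1b, t2b, acc ++ [rounds])

def fixture_generator (users : List Int) : List (List (List Int)) :=
  let length : Int := users.length
  let half : Nat := (users.length + 1) / 2          -- ceil(length/2)
  -- tempList1 = [None]*half; for i in range(half): tempList1[i] = users[i]
  let t1 : List (Option Int) := (List.range half).map (fun (i : Nat) => PySem.List.pyGet? users (i : Int))
  -- j = 0; for i in range(length-1, half-1, -1): tempList2[j] = users[i]; j += 1
  -- (the trailing, never-written slots keep their None)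
  let t2 : List (Option Int) :=
    (PySem.List.pyRange (length - 1) ((half : Int) - 1) (-1)).map
      (fun i => PySem.List.pyGet? users i)
      ++ List.replicate (half - (users.length - half)) none
  -- for j in range(0, length-1): …
  ((PySem.List.pyRange 0 (length - 1) 1).foldl (fun s _ => pvStep half s) (t1, t2, [])).2.2

-- ===== PORT B =====
-- ring[z % m] (index always lands in range while the loop runs)
def pvRingGet (ring : List (Option Int)) (z : Int) : Option Int :=
  ring.getD (PySem.Int.mod z (ring.length : Int)).toNat none

def fixture_generator_alt (users : List Int) : List (List (List Int)) :=
  let length : Int := users.length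
  let half : Nat := (users.length + 1) / 2
  let ring : List (Option Int) :=
    if users.length % 2 = 1 then
      ((users.take half).drop 1).map some ++ [none] ++ (users.drop half).map some
    else (users.drop 1).map some
  (PySem.List.pyRange 0 (length - 1) 1).map (fun j =>
    let top : List (Option Int) :=
      PySem.List.pyGet? users 0 ::
        (PySem.List.pyRange 1 (half : Int) 1).map (fun i => pvRingGet ring (i - 1 - j))
    let bottom : List (Option Int) :=
      (PySem.List.pyRange 0 (half : Int) 1).map
        (fun i => pvRingGet ring (2 * (half : Int) - 2 - i - j))
    (PySem.List.pyRange 0 (half : Int) 1).map (fun i =>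
      [pvVal (PySem.List.pyGet? top i), pvVal (PySem.List.pyGet? bottom i)]))

-- ===== PRECONDITION & SPEC =====
-- Pre_ excludes odd-length lists: there A returns pair lists containing Python's
-- None (the bye), which is not a value of the declared List Int element type.
def Pre_fixture_generator (users : List Int) : Prop := users.length % 2 = 0
instance (users : List Int) : Decidable (Pre_fixture_generator users) := by
  unfold Pre_fixture_generator; infer_instance

def pvWitness_fixture_generator : List Int := [3, 1, 4, 15]

def Spec_fixture_generator (users : List Int) (out : List (List (List Int))) : Prop := out = fixture_generator_alt users
instance (users : List Int) (out : List (List (List Int))) : Decidable (Spec_fixture_generator users out) := by unfold Spec_fixture_generator; infer_instance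

-- ===== CLAIM (what is proved, stated in full; the proofs are below) =====
def Claim_equal_fixture_generator : Prop := ∀ (users : List Int), Dom_fixture_generator users → Pre_fixture_generator users → Spec_fixture_generator users (fixture_generator users)

-- ===== LEMMAS AND PROOFS =====

-- the top row (slot 0 fixed) and bottom row after j rotations, in ring coordinates
def pvT1 (R : List (Option Int)) (a : Option Int) (h j : Nat) : List (Option Int) :=
  a :: (List.range (h - 1)).map (fun (p : Nat) => pvRingGet R ((p : Int) - (j : Int)))
def pvT2 (R : List (Option Int)) (h j : Nat) : List (Option Int) :=
  (List.range h).map (fun (i : Nat) => pvRingGet R (2 * (h : Int) - 2 - (i : Int) - (j : Int)))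

lemma pvRingGet_period (R : List (Option Int)) (z : Int) (hm : 0 < R.length) :
    pvRingGet R (z + R.length) = pvRingGet R z := by
  unfold pvRingGet
  rw [PySem.Int.mod_eq_emod_of_pos (by exact_mod_cast hm),
      PySem.Int.mod_eq_emod_of_pos (by exact_mod_cast hm), Int.add_emod_right]

lemma pvRingGet_small (R : List (Option Int)) (z : Int) (h0 : 0 ≤ z) (h1 : z < R.length) :
    pvRingGet R z = R.getD z.toNat none := by
  unfold pvRingGet
  rw [PySem.Int.mod_eq_emod_of_pos (by omega), Int.emod_eq_of_lt h0 (by exact_mod_cast h1)]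

lemma pv_cons_map_range {α : Type} (f g : Nat → α) (x : α) (n : Nat)
    (h0 : g 0 = x) (hs : ∀ p, g (p + 1) = f p) :
    x :: (List.range n).map f = (List.range (n + 1)).map g := by
  rw [List.range_succ_eq_map, List.map_cons, List.map_map, h0]
  exact congrArg _ (List.map_congr_left (fun p _ => (hs p).symm))

lemma pv_step (R : List (Option Int)) (a : Option Int) (h : Nat) (hh : 1 ≤ h)
    (hm : R.length = 2 * h - 1) (j : Nat) (acc : List (List (List Int))) :
    pvStep h (pvT1 R a h j, pvT2 R h j, acc) =
      (pvT1 R a h (j + 1), pvT2 R h (j + 1),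
        acc ++ [pvRound h (pvT1 R a h j) (pvT2 R h j)]) := by
  obtain ⟨h', rfl⟩ : ∃ h', h = h' + 1 := ⟨h - 1, by omega⟩
  have hmZ : (R.length : Int) = 2 * (h' + 1 : Nat) - 1 := by push_cast [hm]; omega
  have hm0 : 0 < R.length := by omega
  -- the head of the bottom row
  have hT2cons : pvT2 R (h' + 1) j =
      pvRingGet R (2 * ((h' + 1 : Nat) : Int) - 2 - (0 : Int) - (j : Int)) ::
        (List.range h').map
          (fun (i : Nat) => pvRingGet R (2 * ((h' + 1 : Nat) : Int) - 2 - ((i + 1 : Nat) : Int) - (j : Int))) := by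
    unfold pvT2
    rw [List.range_succ_eq_map, List.map_cons, List.map_map]
    simp [Function.comp]
  have hx : (PySem.List.pyGet? (pvT2 R (h' + 1) j) 0).getD none =
      pvRingGet R (2 * ((h' + 1 : Nat) : Int) - 2 - (j : Int)) := by
    rw [hT2cons, PySem.List.pyGet?_zero_cons]
    simp
  -- insert the head of the bottom row at position 1 of the top row
  have hlen1 : 1 ≤ (pvT1 R a (h' + 1) j).length := by unfold pvT1; simp
  have hN : pvRingGet R (2 * ((h' + 1 : Nat) : Int) - 2 - (j : Int)) ::
        (List.range ((h' + 1) - 1)).map (fun (p : Nat) => pvRingGet R ((p : Int) - (j : Int))) =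
      (List.range (h' + 1)).map (fun (p : Nat) => pvRingGet R ((p : Int) - 1 - (j : Int))) := by
    apply pv_cons_map_range
    · have hper := pvRingGet_period R (-1 - (j : Int)) hm0
      rw [hmZ] at hper
      calc pvRingGet R (((0 : Nat) : Int) - 1 - (j : Int))
          = pvRingGet R (-1 - (j : Int)) := congrArg (pvRingGet R) (by push_cast; ring)
        _ = pvRingGet R (-1 - (j : Int) + (2 * ((h' + 1 : Nat) : Int) - 1)) := hper.symm
        _ = pvRingGet R (2 * ((h' + 1 : Nat) : Int) - 2 - (j : Int)) :=
            congrArg (pvRingGet R) (by push_cast; ring)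
    · intro p
      exact congrArg (pvRingGet R) (by push_cast; ring)
  have ht1a : PySem.List.insert (pvT1 R a (h' + 1) j) 1
        ((PySem.List.pyGet? (pvT2 R (h' + 1) j) 0).getD none) =
      a :: (List.range (h' + 1)).map (fun (p : Nat) => pvRingGet R ((p : Int) - 1 - (j : Int))) := by
    rw [hx, PySem.List.insert_ofNat _ 1 _ hlen1]
    unfold pvT1
    simp only [List.take_succ_cons, List.take_zero, List.drop_succ_cons, List.drop_zero,
      List.cons_append, List.nil_append]
    rw [hN]
  -- reading tempList1[half] (the last element after the insert)
  have ht1aGet : (PySem.List.pyGet?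
        (a :: (List.range (h' + 1)).map (fun (p : Nat) => pvRingGet R ((p : Int) - 1 - (j : Int))))
        (((h' + 1 : Nat) : Int))).getD none =
      pvRingGet R ((h' : Int) - 1 - (j : Int)) := by
    rw [PySem.List.pyGet?_natCast]
    simp
  -- now compute the step
  simp only [pvStep, ht1a]
  refine Prod.ext ?_ (Prod.ext ?_ (by simp))
  · -- new top row: drop the last element
    show (a :: (List.range (h' + 1)).map (fun (p : Nat) => pvRingGet R ((p : Int) - 1 - (j : Int)))).dropLast
        = pvT1 R a (h' + 1) (j + 1)
    rw [List.range_succ, List.map_append, List.map_singleton, ← List.cons_append,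
      List.dropLast_concat]
    unfold pvT1
    simp only [Nat.add_sub_cancel]
    refine congrArg _ (List.map_congr_left (fun p _ => ?_))
    exact congrArg (pvRingGet R) (by push_cast; ring)
  · -- new bottom row: tail ++ [tempList1[half]]
    show (pvT2 R (h' + 1) j).drop 1 ++ [(PySem.List.pyGet?
        (a :: (List.range (h' + 1)).map (fun (p : Nat) => pvRingGet R ((p : Int) - 1 - (j : Int))))
        (((h' + 1 : Nat) : Int))).getD none] = pvT2 R (h' + 1) (j + 1)
    rw [ht1aGet, hT2cons]
    simp only [List.drop_succ_cons, List.drop_zero]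
    unfold pvT2
    rw [List.range_succ, List.map_append, List.map_singleton]
    congr 1
    · refine List.map_congr_left (fun i _ => ?_)
      exact congrArg (pvRingGet R) (by push_cast; ring)
    · refine congrArg (fun z => [z]) ?_
      exact congrArg (pvRingGet R) (by push_cast; ring)

lemma pv_fold (R : List (Option Int)) (a : Option Int) (h : Nat) (hh : 1 ≤ h)
    (hm : R.length = 2 * h - 1) (k : Nat) :
    (List.range k).foldl (fun s _ => pvStep h s) (pvT1 R a h 0, pvT2 R h 0, []) =
      (pvT1 R a h k, pvT2 R h k,
        (List.range k).map (fun j => pvRound h (pvT1 R a h j) (pvT2 R h j))) := by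
  induction k with
  | zero => rfl
  | succ k ih =>
      rw [List.range_succ, List.foldl_append, ih, List.map_append]
      simpa using pv_step R a h hh hm k _

lemma pv_init1 (users : List Int) (h' : Nat) (hL : users.length = 2 * (h' + 1)) :
    (List.range (h' + 1)).map (fun (i : Nat) => PySem.List.pyGet? users (i : Int)) =
      pvT1 ((users.drop 1).map some) (PySem.List.pyGet? users 0) (h' + 1) 0 := by
  unfold pvT1
  rw [List.range_succ_eq_map, List.map_cons, List.map_map]
  simp only [Nat.cast_zero, Nat.add_sub_cancel]
  congr 1
  refine List.map_congr_left (fun p hp => ?_)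
  have hp' : p < h' := List.mem_range.mp hp
  have hs : pvRingGet ((users.drop 1).map some) ((p : Int) - 0) =
      ((users.drop 1).map some).getD p none := by
    rw [show ((p : Int) - 0) = (p : Int) by ring]
    rw [pvRingGet_small _ _ (by omega) (by simp [hL]; omega)]
    simp
  rw [hs, Function.comp_apply, PySem.List.pyGet?_natCast]
  rw [List.getD_eq_getElem?_getD, List.getElem?_map, List.getElem?_drop,
    show 1 + p = p + 1 from by omega]
  simp only [Nat.succ_eq_add_one]
  rw [List.getElem?_eq_getElem (by omega : p + 1 < users.length)]
  simp

lemma pv_init2 (users : List Int) (h' : Nat) (hL : users.length = 2 * (h' + 1)) :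
    (PySem.List.pyRange ((users.length : Int) - 1) (((h' + 1 : Nat) : Int) - 1) (-1)).map
        (fun i => PySem.List.pyGet? users i)
      ++ List.replicate ((h' + 1) - (users.length - (h' + 1))) none =
      pvT2 ((users.drop 1).map some) (h' + 1) 0 := by
  have hrep : (h' + 1) - (users.length - (h' + 1)) = 0 := by omega
  rw [hrep, List.replicate_zero, List.append_nil, PySem.List.pyRange_neg_one]
  have hcnt : (((users.length : Int) - 1) - (((h' + 1 : Nat) : Int) - 1)).toNat = h' + 1 := by
    omega
  rw [hcnt, List.map_map]
  unfold pvT2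
  refine List.map_congr_left (fun k hk => ?_)
  have hk' : k < h' + 1 := List.mem_range.mp hk
  have hz : pvRingGet ((users.drop 1).map some)
        (2 * ((h' + 1 : Nat) : Int) - 2 - (k : Int) - ((0 : Nat) : Int)) =
      ((users.drop 1).map some).getD (2 * h' - k) none := by
    rw [show (2 * ((h' + 1 : Nat) : Int) - 2 - (k : Int) - ((0 : Nat) : Int)) =
        ((2 * h' - k : Nat) : Int) by omega]
    rw [pvRingGet_small _ _ (by omega) (by simp [hL]; omega)]
    simp
  rw [hz, Function.comp_apply]
  rw [show ((users.length : Int) - 1 - (k : Int)) = ((2 * h' + 1 - k : Nat) : Int) by omega]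
  rw [PySem.List.pyGet?_natCast]
  rw [List.getD_eq_getElem?_getD, List.getElem?_map, List.getElem?_drop,
    show 1 + (2 * h' - k) = 2 * h' + 1 - k from by omega]
  rw [List.getElem?_eq_getElem (by omega : 2 * h' + 1 - k < users.length)]
  simp

lemma pv_round_eq (users : List Int) (h' : Nat) (j : Nat) :
    (PySem.List.pyRange 0 (((h' + 1 : Nat) : Int)) 1).map (fun i =>
        [pvVal (PySem.List.pyGet?
            (PySem.List.pyGet? users 0 ::
              (PySem.List.pyRange 1 (((h' + 1 : Nat) : Int)) 1).map
                (fun i' => pvRingGet ((users.drop 1).map some) (i' - 1 - (0 + (j : Int))))) i),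
         pvVal (PySem.List.pyGet?
            ((PySem.List.pyRange 0 (((h' + 1 : Nat) : Int)) 1).map
              (fun i' => pvRingGet ((users.drop 1).map some)
                (2 * ((h' + 1 : Nat) : Int) - 2 - i' - (0 + (j : Int))))) i)]) =
      pvRound (h' + 1) (pvT1 ((users.drop 1).map some) (PySem.List.pyGet? users 0) (h' + 1) j)
        (pvT2 ((users.drop 1).map some) (h' + 1) j) := by
  have hr0 : PySem.List.pyRange 0 (((h' + 1 : Nat) : Int)) 1 =
      (List.range (h' + 1)).map (fun (k : Nat) => (0 : Int) + (k : Int)) := by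
    rw [PySem.List.pyRange_one,
      show ((((h' + 1 : Nat) : Int)) - 0).toNat = h' + 1 from by omega]
  have hr1 : PySem.List.pyRange 1 (((h' + 1 : Nat) : Int)) 1 =
      (List.range h').map (fun (k : Nat) => (1 : Int) + (k : Int)) := by
    rw [PySem.List.pyRange_one,
      show ((((h' + 1 : Nat) : Int)) - 1).toNat = h' from by omega]
  have htop : PySem.List.pyGet? users 0 ::
        (PySem.List.pyRange 1 (((h' + 1 : Nat) : Int)) 1).map
          (fun i' => pvRingGet ((users.drop 1).map some) (i' - 1 - (0 + (j : Int)))) =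
      pvT1 ((users.drop 1).map some) (PySem.List.pyGet? users 0) (h' + 1) j := by
    rw [hr1, List.map_map]
    unfold pvT1
    simp only [Nat.add_sub_cancel]
    refine congrArg _ (List.map_congr_left (fun p _ => ?_))
    exact congrArg (pvRingGet _) (by push_cast; ring)
  have hbot : (PySem.List.pyRange 0 (((h' + 1 : Nat) : Int)) 1).map
        (fun i' => pvRingGet ((users.drop 1).map some)
          (2 * ((h' + 1 : Nat) : Int) - 2 - i' - (0 + (j : Int)))) =
      pvT2 ((users.drop 1).map some) (h' + 1) j := by
    rw [hr0, List.map_map]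
    unfold pvT2
    refine List.map_congr_left (fun p _ => ?_)
    exact congrArg (pvRingGet _) (by push_cast; ring)
  rw [htop, hbot, hr0, List.map_map]
  unfold pvRound
  refine List.map_congr_left (fun i _ => ?_)
  simp

-- ===== VERDICT (by name: the statement is the Claim_ definition above) =====
theorem fixture_generator_spec : Claim_equal_fixture_generator := by
  intro users _ hpre
  show fixture_generator users = fixture_generator_alt users
  by_cases hnil : users = []
  · subst hnil; decide
  · have hlen0 : 0 < users.length := List.length_pos_iff.mpr hnil
    have hpre' : users.length % 2 = 0 := hpre
    obtain ⟨h', hL⟩ : ∃ k, users.length = 2 * (k + 1) := ⟨users.length / 2 - 1, by omega⟩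
    have hhalf : (users.length + 1) / 2 = h' + 1 := by omega
    have hRlen : (((users.drop 1).map some : List (Option Int))).length = 2 * (h' + 1) - 1 := by
      simp [hL]
    simp only [fixture_generator, fixture_generator_alt, hhalf]
    rw [if_neg (by omega : ¬ users.length % 2 = 1)]
    have hout : PySem.List.pyRange 0 ((users.length : Int) - 1) 1 =
        (List.range (2 * h' + 1)).map (fun (k : Nat) => (0 : Int) + (k : Int)) := by
      rw [PySem.List.pyRange_one,
        show (((users.length : Int)) - 1 - 0).toNat = 2 * h' + 1 from by omega]
    rw [hout, List.foldl_map, List.map_map]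
    rw [pv_init1 users h' hL, pv_init2 users h' hL]
    rw [pv_fold _ _ _ (by omega) hRlen (2 * h' + 1)]
    refine List.map_congr_left (fun j hj => ?_)
    exact (pv_round_eq users h' j).symm
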